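-- pv_equiv track=rewrite | github.com/malikjee4/octobots | scripts/select-agents.py | run_all
-- ===== SOURCE A (Python) =====
-- def run_all(registry):
--     """Return all agents (one QA: first in list)."""
--     agents = registry.get("agents", [])
--     qa_groups = {}
--     selected = []
--     for a in agents:
--         group = a.get("group")
--         if group == "qa":
--             if group not in qa_groups:
--                 qa_groups[group] = a["id"]
--                 selected.append(a["id"])
--         else:
--             selected.append(a["id"])
--     return selected
-- ===== SOURCE B (Python) =====
-- def run_all(registry):
--     """Return all agents (one QA: first in list)."""
--     agents = registry.get("agents", [])
--     first_qa = next((i for i, a in enumerate(agents) if a.get("group") == "qa"), -1)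
--     return [a["id"] for i, a in enumerate(agents) if a.get("group") != "qa" or i == first_qa]
-- ===== Notes on version B (the rewrite author's own statement) =====
-- stated objective: alternative
-- what changed: Replaces A's stateful seen-flag loop with a dict accumulator by a two-phase index-locate (first qa index) followed by a single filtered comprehension over enumerate; Pre_ only excludes inputs on which A raises KeyError (a selected agent missing its 'id' key), where B raises too.
import Mathlib
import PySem

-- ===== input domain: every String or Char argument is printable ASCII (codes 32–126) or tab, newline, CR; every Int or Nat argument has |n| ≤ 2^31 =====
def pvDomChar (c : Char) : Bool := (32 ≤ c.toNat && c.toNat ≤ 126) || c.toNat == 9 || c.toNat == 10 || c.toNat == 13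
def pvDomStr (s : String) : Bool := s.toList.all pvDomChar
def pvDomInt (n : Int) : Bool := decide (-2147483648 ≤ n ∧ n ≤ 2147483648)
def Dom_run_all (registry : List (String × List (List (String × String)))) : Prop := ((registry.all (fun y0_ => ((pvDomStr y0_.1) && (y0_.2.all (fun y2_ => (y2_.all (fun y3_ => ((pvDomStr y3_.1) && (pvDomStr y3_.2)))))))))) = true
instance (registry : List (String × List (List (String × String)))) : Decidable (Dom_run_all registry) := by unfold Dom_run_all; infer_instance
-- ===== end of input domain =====

-- B changes the decomposition: an explicit first-qa-index locate phase followed by one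
-- filtered pass, instead of A's seen-flag loop carrying a dict; same cost, no speed claim.

-- d.get(k) on a plain association list (first match; exact for Python dict lookup order)
def pvLook {α : Type} (d : List (String × α)) (k : String) : Option α :=
  (d.find? (fun p => p.1 == k)).map (·.2)

-- a["id"] is only reached under Pre_ (the key is present); getD "" is then exact
def pvId (a : List (String × String)) : String := (pvLook a "id").getD ""

-- ===== PORT A =====
-- A's loop body (one iteration of the for-loop, state = (qa_groups, selected))
def pvStep (st : PySem.Dict String String × List String)
    (a : List (String × String)) : PySem.Dict String String × List String :=
  let group := pvLook a "group"
  if group == some "qa" then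
    if !(st.1.contains "qa") then
      (st.1.insert "qa" (pvId a), st.2 ++ [pvId a])
    else st
  else (st.1, st.2 ++ [pvId a])

def run_all (registry : List (String × List (List (String × String)))) : List String :=
  let agents := (pvLook registry "agents").getD []
  (agents.foldl pvStep (PySem.Dict.empty, [])).2

-- ===== PORT B =====
def run_all_alt (registry : List (String × List (List (String × String)))) : List String :=
  let agents := (pvLook registry "agents").getD []
  let first_qa : Int :=
    match agents.findIdx? (fun a => pvLook a "group" == some "qa") with
    | some i => (i : Int)
    | none => -1
  ((PySem.List.enumerate agents 0).filter
      (fun p => pvLook p.2 "group" != some "qa" || p.1 == first_qa)).map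
    (fun p => pvId p.2)

-- ===== PRECONDITION & SPEC =====
-- Pre_ excludes exactly the inputs on which A raises KeyError — some selected agent
-- (a non-qa agent, or the first qa agent) has no "id" key; B raises there as well.
-- Stated positively: every agent either has an "id" key, or is a qa agent preceded
-- by an earlier qa agent (i.e. a suppressed later qa agent, whose "id" A never reads).
def Pre_run_all (registry : List (String × List (List (String × String)))) : Prop :=
  (((pvLook registry "agents").getD []).zipIdx.all (fun p =>
      (pvLook p.1 "id").isSome ||
      (pvLook p.1 "group" == some "qa" &&
        (((pvLook registry "agents").getD []).take p.2).any
          (fun b => pvLook b "group" == some "qa")))) = true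
instance (registry : List (String × List (List (String × String)))) : Decidable (Pre_run_all registry) := by unfold Pre_run_all; infer_instance

def pvWitness_run_all : (List (String × List (List (String × String)))) :=
  [("agents", [[("id", "a1"), ("group", "dev")], [("id", "a2"), ("group", "qa")], [("id", "a3"), ("group", "qa")]])]

def Spec_run_all (registry : List (String × List (List (String × String)))) (out : List String) : Prop := out = run_all_alt registry
instance (registry : List (String × List (List (String × String)))) (out : List String) : Decidable (Spec_run_all registry out) := by unfold Spec_run_all; infer_instance

-- ===== CLAIM (what is proved, stated in full; the proofs are below) =====
def Claim_equal_run_all : Prop := ∀ (registry : List (String × List (List (String × String)))), Dom_run_all registry → Pre_run_all registry → Spec_run_all registry (run_all registry)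

-- ===== LEMMAS AND PROOFS =====

def pvIsQa (a : List (String × String)) : Bool := pvLook a "group" == some "qa"

-- the common selection spec: seen-flag recursion both ports are reduced to
def pvSel : Bool → List (List (String × String)) → List String
  | _, [] => []
  | seen, a :: rest =>
    if pvIsQa a then
      (if seen then pvSel true rest else pvId a :: pvSel true rest)
    else pvId a :: pvSel seen rest

theorem foldA_eq_sel (l : List (List (String × String)))
    (d : PySem.Dict String String) (acc : List String) :
    (l.foldl pvStep (d, acc)).2 = acc ++ pvSel (d.contains "qa") l := by
  induction l generalizing d acc with
  | nil => simp [pvSel]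
  | cons a rest ih =>
    rw [List.foldl_cons]
    by_cases hq : pvLook a "group" = some "qa"
    · by_cases hc : d.contains "qa" = true
      · have hstep : pvStep (d, acc) a = (d, acc) := by simp [pvStep, hq, hc]
        rw [hstep, ih, hc]
        simp [pvSel, pvIsQa, hq]
      · have hc' : d.contains "qa" = false := by simpa using hc
        have hstep : pvStep (d, acc) a
            = (d.insert "qa" (pvId a), acc ++ [pvId a]) := by
          simp [pvStep, hq, hc']
        rw [hstep, ih, PySem.Dict.contains_insert_self, hc']
        simp [pvSel, pvIsQa, hq]
    · have hstep : pvStep (d, acc) a = (d, acc ++ [pvId a]) := by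
        simp [pvStep, hq]
      rw [hstep, ih]
      have hq' : pvIsQa a = false := by simp [pvIsQa, hq]
      simp [pvSel, hq']

def pvCore (f : Int) (n : Int) (l : List (List (String × String))) : List String :=
  ((PySem.List.enumerate l n).filter
      (fun p => pvLook p.2 "group" != some "qa" || p.1 == f)).map (fun p => pvId p.2)

theorem core_seen (l : List (List (String × String))) (n f : Int) (h : f < n) :
    pvCore f n l = pvSel true l := by
  induction l generalizing n with
  | nil => simp [pvCore, pvSel, PySem.List.enumerate_nil]
  | cons a rest ih =>
    have hcore := ih (n + 1) (by omega)
    simp only [pvCore] at hcore ⊢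
    rw [PySem.List.enumerate_cons, List.filter_cons]
    by_cases hq : pvLook a "group" = some "qa"
    · have hnf : ¬(n = f) := by omega
      simp [pvSel, pvIsQa, hq, hnf, hcore]
    · simp [pvSel, pvIsQa, hq, hcore]

theorem core_first (l : List (List (String × String))) (n : Int) (j : Nat)
    (h : l.findIdx? pvIsQa = some j) :
    pvCore (n + j) n l = pvSel false l := by
  induction l generalizing n j with
  | nil => simp at h
  | cons a rest ih =>
    rw [pvCore, PySem.List.enumerate_cons, List.filter_cons]
    by_cases hq : pvLook a "group" = some "qa"
    · have hj : j = 0 := by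
        simp [List.findIdx?_cons, pvIsQa, hq] at h; omega
      subst hj
      have hseen := core_seen rest (n + 1) n (by omega)
      simp only [pvCore] at hseen
      simp [pvSel, pvIsQa, hq, hseen]
    · have hj : ∃ j', rest.findIdx? pvIsQa = some j' ∧ j = j' + 1 := by
        simp [List.findIdx?_cons, pvIsQa, hq] at h
        rcases h with ⟨j', h1, h2⟩; exact ⟨j', h1, h2.symm⟩
      rcases hj with ⟨j', hrest, rfl⟩
      have hrec := ih (n + 1) j' hrest
      simp only [pvCore] at hrec
      have harith : n + (((j' : Nat) + 1 : Nat) : Int) = (n + 1) + (j' : Int) := by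
        push_cast; ring
      simp [pvSel, pvIsQa, hq]
      rw [show n + ((j' : Int) + 1) = n + 1 + (j' : Int) by ring]
      exact hrec

theorem sel_true_of_noQa (l : List (List (String × String)))
    (h : ∀ a ∈ l, pvIsQa a = false) : pvSel true l = pvSel false l := by
  induction l with
  | nil => rfl
  | cons a rest ih =>
    have ha := h a (by simp)
    simp [pvSel, ha, ih (fun b hb => h b (by simp [hb]))]

theorem ports_agree (registry : List (String × List (List (String × String)))) :
    run_all registry = run_all_alt registry := by
  unfold run_all run_all_alt
  rw [foldA_eq_sel]
  rw [show (fun (a : List (String × String)) => pvLook a "group" == some "qa") = pvIsQa from rfl]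
  set agents := (pvLook registry "agents").getD [] with hag
  rw [PySem.Dict.contains_empty, List.nil_append]
  cases hf : agents.findIdx? pvIsQa with
  | none =>
    have hno : ∀ a ∈ agents, pvIsQa a = false :=
      fun a ha => by simpa using List.findIdx?_eq_none_iff.mp hf a ha
    simp only [hf]
    have h1 := core_seen agents 0 (-1) (by omega)
    simp only [pvCore] at h1
    simpa [h1] using (sel_true_of_noQa agents hno).symm
  | some j =>
    simp only [hf]
    have h1 := core_first agents 0 j hf
    simp only [pvCore, zero_add] at h1
    simpa using h1.symm

-- ===== VERDICT (by name: the statement is the Claim_ definition above) =====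
theorem run_all_spec : Claim_equal_run_all := by
  intro registry _hdom _hpre
  unfold Spec_run_all
  exact ports_agree registry
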